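-- pv_equiv track=rewrite | github.com/linkervision/dataverse-sdk | python/dataverse_sdk/export/visionai.py | gen_intervals
-- ===== SOURCE A (Python) =====
-- def merge_intervals(intervals: list[tuple[int, int]]):
--     # merge intervals in case there is any interval that could overlap
--     # [(0, 3), (3, 5), (8, 9), (12, 12)] -> [(0, 5), (8, 9), (12, 12)]
--     if not intervals:
--         return []
--
--     # Step 1: Sort intervals based on the start time
--     intervals.sort(key=lambda x: x[0])
--
--     # Step 2: Initialize merged list and add the first interval
--     merged = [intervals[0]]
--
--     # Step 3: Merge overlapping intervals
--     for interval in intervals[1:]: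
--         last_merged_interval = merged[-1]
--
--         # Check if the current interval overlaps with the last interval in the merged list
--         if interval[0] - last_merged_interval[1] > 1:
--             # If there is no overlap, simply add the current interval to the merged list
--             merged.append(interval)
--             continue
--
--         # Merge the intervals by updating the end time of the last interval in the merged list
--         last_merged_interval = (
--             last_merged_interval[0],
--             max(last_merged_interval[1], interval[1]),
--         )
--         merged[-1] = last_merged_interval
--
--     # Step 4: Return the merged list of intervals
--     return merged
--
-- def gen_intervals(range_list: list[int]) -> list[tuple[int, int]]:
--     """given a list of numbers, return its range interval list
--
--     Parameters
--     ----------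
--     range_list : list[int]
--         list of numbers
--
--     Returns
--     -------
--     list[tuple[int, int]]
--         list of range intervals in tuple, where first index is the start of the range,
--         the second index is the end of the range
--     """
--     # generate intervals from list
--     # [0,1,2,3,5,8,9,12] -> [(0, 3), (5, 5), (8, 9), (12, 12)]
--     range_list.sort()
--     start, end = range_list[0], range_list[0]
--     result_intervals: list[tuple[int, int]] = [(start, end)]
--     for frame_num in range_list:
--         last_start, last_end = result_intervals[-1]
--         if last_start <= frame_num <= last_end:
--             continue
--         if frame_num > last_end and frame_num - last_end == 1:
--             result_intervals[-1] = (last_start, frame_num)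
--         elif frame_num < last_start and last_start - frame_num == 1:
--             result_intervals[-1] = (frame_num, last_end)
--         else:
--             result_intervals.append((frame_num, frame_num))
--
--     if len(result_intervals) == 1:
--         return result_intervals
--
--     return merge_intervals(result_intervals)
-- ===== SOURCE B (Python) =====
-- def gen_intervals(range_list: list[int]) -> list[tuple[int, int]]:
--     # Single pass over the sorted list carrying the current run (start, end);
--     # duplicates are skipped, closed runs are appended once, so no merge pass is needed.
--     range_list.sort()
--     if not range_list:
--         return []
--     out: list[tuple[int, int]] = []
--     start = end = range_list[0]
--     for v in range_list[1:]:
--         if v <= end: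
--             continue
--         if v == end + 1:
--             end = v
--         else:
--             out.append((start, end))
--             start = end = v
--     out.append((start, end))
--     return out
-- ===== Notes on version B (the rewrite author's own statement) =====
-- stated objective: simpler
-- what changed: B replaces A's loop that repeatedly reads and rewrites the last element of the result list plus a final merge_intervals pass (with its own sort) by one pass over the sorted list carrying a scalar (start, end) run appended only when closed, so the merge pass disappears; B sorts range_list in place like A.
import Mathlib
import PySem

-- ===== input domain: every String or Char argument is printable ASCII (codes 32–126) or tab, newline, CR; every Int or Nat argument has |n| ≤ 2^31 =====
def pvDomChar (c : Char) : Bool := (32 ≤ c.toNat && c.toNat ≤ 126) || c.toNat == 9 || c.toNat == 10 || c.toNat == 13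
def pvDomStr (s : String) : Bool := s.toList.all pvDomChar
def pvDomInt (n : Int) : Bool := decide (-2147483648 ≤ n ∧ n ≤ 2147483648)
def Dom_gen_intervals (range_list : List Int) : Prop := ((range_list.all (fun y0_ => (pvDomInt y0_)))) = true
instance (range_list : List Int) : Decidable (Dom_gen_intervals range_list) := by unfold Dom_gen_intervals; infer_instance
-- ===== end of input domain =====

-- B: one pass over the sorted list carrying a scalar (start, end) run, appended when closed;
-- A's merge_intervals pass disappears.  Equivalence is about the RETURN value; both A and B
-- sort range_list in place.

-- ===== PORT A =====
def pvMergeStep (merged : List (Int × Int)) (interval : Int × Int) : List (Int × Int) :=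
  match merged.getLast? with
  | none => merged
  | some last =>
    if interval.1 - last.2 > 1 then merged ++ [interval]
    else merged.dropLast ++ [(last.1, max last.2 interval.2)]

def merge_intervals (intervals : List (Int × Int)) : List (Int × Int) :=
  match intervals with
  | [] => []
  | _ :: _ =>
    match PySem.List.sorted intervals (fun x => x.1) false with
    | [] => []   -- unreachable: sorted of a nonempty list is nonempty
    | first :: restIv => restIv.foldl pvMergeStep [first]

def pvStepA (acc : List (Int × Int)) (frame_num : Int) : List (Int × Int) :=
  match acc.getLast? with
  | none => acc
  | some last =>
    if last.1 ≤ frame_num ∧ frame_num ≤ last.2 then acc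
    else if frame_num > last.2 ∧ frame_num - last.2 = 1 then acc.dropLast ++ [(last.1, frame_num)]
    else if frame_num < last.1 ∧ last.1 - frame_num = 1 then acc.dropLast ++ [(frame_num, last.2)]
    else acc ++ [(frame_num, frame_num)]

def gen_intervals (range_list : List Int) : List (Int × Int) :=
  let sorted := PySem.List.sorted range_list (fun x => x) false
  match sorted with
  | [] => []   -- Python raises IndexError here (first-element read of an empty list); excluded by Pre_gen_intervals
  | start :: _ =>
    let result := sorted.foldl pvStepA [(start, start)]
    if result.length = 1 then result else merge_intervals result

-- ===== PORT B =====
def pvStepB (st : Int × Int × List (Int × Int)) (v : Int) : Int × Int × List (Int × Int) :=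
  if v ≤ st.2.1 then st
  else if v = st.2.1 + 1 then (st.1, v, st.2.2)
  else (v, v, st.2.2 ++ [(st.1, st.2.1)])

def gen_intervals_alt (range_list : List Int) : List (Int × Int) :=
  match PySem.List.sorted range_list (fun x => x) false with
  | [] => []
  | x :: rest =>
    let st := rest.foldl pvStepB (x, x, [])
    st.2.2 ++ [(st.1, st.2.1)]

-- ===== PRECONDITION & SPEC =====
-- A reads the first element of range_list, so it raises IndexError exactly on the empty list.
def Pre_gen_intervals (range_list : List Int) : Prop := range_list ≠ []
instance (range_list : List Int) : Decidable (Pre_gen_intervals range_list) := by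
  unfold Pre_gen_intervals; infer_instance

def pvWitness_gen_intervals : List Int := [3, 1, 2, 9, 2]

def Spec_gen_intervals (range_list : List Int) (out : List (Int × Int)) : Prop :=
  out = gen_intervals_alt range_list
instance (range_list : List Int) (out : List (Int × Int)) : Decidable (Spec_gen_intervals range_list out) := by
  unfold Spec_gen_intervals; infer_instance

-- ===== CLAIM (what is proved, stated in full; the proofs are below) =====
def Claim_equal_gen_intervals : Prop := ∀ (range_list : List Int), Dom_gen_intervals range_list → Pre_gen_intervals range_list → Spec_gen_intervals range_list (gen_intervals range_list)

-- ===== LEMMAS AND PROOFS =====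

-- the out-component of B's fold state is only ever appended to
lemma foldB_out (rest : List Int) (s e : Int) (out0 : List (Int × Int)) :
    rest.foldl pvStepB (s, e, out0) =
      ((rest.foldl pvStepB (s, e, [])).1, (rest.foldl pvStepB (s, e, [])).2.1,
        out0 ++ (rest.foldl pvStepB (s, e, [])).2.2) := by
  induction rest generalizing s e out0 with
  | nil => simp
  | cons v rest ih =>
    simp only [List.foldl_cons, pvStepB, List.nil_append]
    split_ifs with h1 h2
    · exact ih s e out0
    · exact ih s v out0
    · rw [ih v v (out0 ++ [(s, e)]), ih v v [(s, e)]]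
      simp

-- A's fold state is B's fold state flattened, on a sorted tail
lemma loop_eq (rest : List Int) (pre : List (Int × Int)) (s e : Int)
    (hse : s ≤ e) (hch : List.IsChain (· ≤ ·) (e :: rest)) :
    rest.foldl pvStepA (pre ++ [(s, e)]) =
      pre ++ ((rest.foldl pvStepB (s, e, [])).2.2 ++
        [((rest.foldl pvStepB (s, e, [])).1, (rest.foldl pvStepB (s, e, [])).2.1)]) := by
  induction rest generalizing pre s e with
  | nil => simp
  | cons v rest ih =>
    have hev : e ≤ v := hch.rel_head
    have hch' : List.IsChain (· ≤ ·) (v :: rest) := (List.isChain_cons_cons.mp hch).2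
    simp only [List.foldl_cons, pvStepA, pvStepB, List.getLast?_concat,
      List.dropLast_concat, List.nil_append]
    by_cases h1 : v ≤ e
    · -- v = e : both sides skip
      have hve : v = e := le_antisymm h1 hev
      rw [if_pos (⟨by omega, h1⟩ : s ≤ v ∧ v ≤ e), if_pos h1]
      exact ih pre s e hse (hve ▸ hch')
    · by_cases h2 : v = e + 1
      · -- extend the current run
        rw [if_neg (by omega : ¬(s ≤ v ∧ v ≤ e)), if_pos (by omega : v > e ∧ v - e = 1),
          if_neg h1, if_pos h2]
        exact ih pre s v (by omega) (h2 ▸ hch')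
      · -- gap of at least 2 : start a new run
        rw [if_neg (by omega : ¬(s ≤ v ∧ v ≤ e)), if_neg (by omega : ¬(v > e ∧ v - e = 1)),
          if_neg (by omega : ¬(v < s ∧ s - v = 1)), if_neg h1, if_neg h2]
        rw [ih (pre ++ [(s, e)]) v v le_rfl hch', foldB_out rest v v [(s, e)]]
        simp

-- invariant of B's fold: the produced interval list is gap-separated and each start ≤ end
lemma foldB_inv (rest : List Int) (s e : Int) (out0 : List (Int × Int))
    (hse : s ≤ e) (hch : List.IsChain (· ≤ ·) (e :: rest))
    (hgap : List.IsChain (fun p q => p.2 + 2 ≤ q.1) (out0 ++ [(s, e)]))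
    (hle : ∀ p ∈ out0 ++ [(s, e)], p.1 ≤ p.2) :
    List.IsChain (fun p q => p.2 + 2 ≤ q.1)
      ((rest.foldl pvStepB (s, e, out0)).2.2 ++
        [((rest.foldl pvStepB (s, e, out0)).1, (rest.foldl pvStepB (s, e, out0)).2.1)]) ∧
    ∀ p ∈ (rest.foldl pvStepB (s, e, out0)).2.2 ++
        [((rest.foldl pvStepB (s, e, out0)).1, (rest.foldl pvStepB (s, e, out0)).2.1)],
      p.1 ≤ p.2 := by
  induction rest generalizing s e out0 with
  | nil => exact ⟨hgap, hle⟩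
  | cons v rest ih =>
    have hev : e ≤ v := hch.rel_head
    have hch' : List.IsChain (· ≤ ·) (v :: rest) := (List.isChain_cons_cons.mp hch).2
    simp only [List.foldl_cons, pvStepB]
    split_ifs with h1 h2
    · exact ih s e out0 hse (le_antisymm h1 hev ▸ hch') hgap hle
    · refine ih s v out0 (by omega) (h2 ▸ hch') ?_ ?_
      · -- replacing the snd of the final interval keeps the gap chain
        rcases List.isChain_append.mp hgap with ⟨ha, _, hlast⟩
        refine List.IsChain.append ha (List.isChain_singleton _) ?_
        intro x hx y hy
        simp only [List.head?_cons, Option.mem_some_iff] at hy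
        exact hy ▸ hlast x hx (s, e) rfl
      · intro p hp
        rcases List.mem_append.mp hp with h | h
        · exact hle p (List.mem_append_left _ h)
        · simp only [List.mem_singleton] at h
          subst h; omega
    · refine ih v v (out0 ++ [(s, e)]) le_rfl hch' ?_ ?_
      · refine List.IsChain.append hgap (List.isChain_singleton _) ?_
        intro x hx y hy
        rw [List.getLast?_concat, Option.mem_some_iff] at hx
        simp only [List.head?_cons, Option.mem_some_iff] at hy
        subst hx; subst hy
        omega
      · intro p hp
        rcases List.mem_append.mp hp with h | h
        · exact hle p h
        · simp only [List.mem_singleton] at h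
          subst h; exact le_rfl

-- gap-chained intervals with start ≤ end have strictly increasing starts
lemma gap_pairwise (l : List (Int × Int))
    (hch : List.IsChain (fun p q => p.2 + 2 ≤ q.1) l)
    (hle : ∀ p ∈ l, p.1 ≤ p.2) :
    List.Pairwise (fun p q : Int × Int => p.1 < q.1) l := by
  induction l with
  | nil => exact List.Pairwise.nil
  | cons p l ih =>
    have hIH := ih hch.tail (fun q hq => hle q (List.mem_cons_of_mem _ hq))
    refine List.pairwise_cons.mpr ⟨?_, hIH⟩
    intro q hq
    cases l with
    | nil => simp at hq
    | cons r l' =>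
      have hpr : p.2 + 2 ≤ r.1 := hch.rel_head
      have hpp : p.1 ≤ p.2 := hle p List.mem_cons_self
      rcases List.mem_cons.mp hq with h | h
      · subst h; omega
      · have := (List.pairwise_cons.mp hIH).1 q h
        omega

-- merge_intervals is the identity on a gap-chained interval list with start ≤ end
lemma merge_id (l : List (Int × Int))
    (hch : List.IsChain (fun p q => p.2 + 2 ≤ q.1) l)
    (hle : ∀ p ∈ l, p.1 ≤ p.2) :
    merge_intervals l = l := by
  have hpw := gap_pairwise l hch hle
  have hsorted : PySem.List.sorted l (fun x => x.1) false = l :=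
    PySem.List.sorted_eq_self_of_pairwise l (fun x => x.1) (hpw.imp fun h => le_of_lt h)
  cases l with
  | nil => rfl
  | cons first rest =>
    unfold merge_intervals
    rw [hsorted]
    have main : ∀ (t pre : List (Int × Int)) (p : Int × Int),
        List.IsChain (fun a b => a.2 + 2 ≤ b.1) (p :: t) →
        t.foldl pvMergeStep (pre ++ [p]) = pre ++ p :: t := by
      intro t
      induction t with
      | nil => intro pre p _; simp
      | cons q t iht =>
        intro pre p hc
        have hpq : p.2 + 2 ≤ q.1 := hc.rel_head
        simp only [List.foldl_cons, pvMergeStep, List.getLast?_concat]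
        rw [if_pos (by omega : q.1 - p.2 > 1), iht (pre ++ [p]) q (List.isChain_cons_cons.mp hc).2]
        simp
    simpa using main rest [] first hch

-- ===== VERDICT (by name: the statement is the Claim_ definition above) =====
theorem gen_intervals_spec : Claim_equal_gen_intervals := by
  intro range_list _ hpre
  unfold Spec_gen_intervals
  cases hs : PySem.List.sorted range_list (fun x => x) false with
  | nil => exact absurd ((PySem.List.sorted_eq_nil_iff range_list (fun y => y) false).mp hs) hpre
  | cons x rest =>
    have hpw : List.Pairwise (· ≤ ·) (x :: rest) := by
      have h := PySem.List.sorted_pairwise range_list (fun y => y)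
      rw [hs] at h
      exact h
    have hch : List.IsChain (· ≤ ·) (x :: rest) := hpw.isChain
    simp only [gen_intervals, gen_intervals_alt, hs]
    have hstep0 : pvStepA [(x, x)] x = [(x, x)] := by simp [pvStepA]
    have hfold : (x :: rest).foldl pvStepA [(x, x)] =
        ((rest.foldl pvStepB (x, x, [])).2.2 ++
          [((rest.foldl pvStepB (x, x, [])).1, (rest.foldl pvStepB (x, x, [])).2.1)]) := by
      rw [List.foldl_cons, hstep0]
      simpa using loop_eq rest [] x x le_rfl hch
    rw [hfold]
    have hinv := foldB_inv rest x x [] le_rfl hch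
      (by simp) (by simp)
    by_cases hlen : ((rest.foldl pvStepB (x, x, [])).2.2 ++
        [((rest.foldl pvStepB (x, x, [])).1, (rest.foldl pvStepB (x, x, [])).2.1)]).length = 1
    · simp [hlen]
    · rw [if_neg hlen]
      exact merge_id _ hinv.1 hinv.2
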